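-- pv_equiv track=rewrite | github.com/Jurgen-Be/ijssalon_ellie | helper.py | onderstreep
-- ===== SOURCE A (Python) =====
-- def onderstreep(tekst=""):
--     uit = []
--     uit.append(tekst)
--     tekens =""
--     for teken in tekst:
--         teken = "="
--         tekens += teken
--     uit.append(tekens)
--     return uit
-- ===== SOURCE B (Python) =====
-- def onderstreep(tekst=""):
--     return [tekst, "=" * len(tekst)]
-- ===== Notes on version B (the rewrite author's own statement) =====
-- stated objective: simpler
-- what changed: Replaces the per-character accumulation loop with a closed-form string repetition of the underline character len(tekst) times, returning the pair directly.
import Mathlib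
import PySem

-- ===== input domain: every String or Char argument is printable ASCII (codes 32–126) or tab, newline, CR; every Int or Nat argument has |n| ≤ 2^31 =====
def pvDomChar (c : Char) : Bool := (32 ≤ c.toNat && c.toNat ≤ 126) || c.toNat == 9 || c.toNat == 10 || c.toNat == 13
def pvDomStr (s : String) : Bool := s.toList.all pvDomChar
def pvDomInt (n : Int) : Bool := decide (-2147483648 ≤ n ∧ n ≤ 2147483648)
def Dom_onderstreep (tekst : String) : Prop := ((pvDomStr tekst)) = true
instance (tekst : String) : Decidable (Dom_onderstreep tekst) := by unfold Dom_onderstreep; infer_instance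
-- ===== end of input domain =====

-- B builds the underline as '=' repeated len(tekst) times instead of A's per-character accumulation loop (objective: simpler).

-- ===== PORT A =====
-- A: loop over the characters of tekst, appending "=" to an accumulator each step
def onderstreep (tekst : String) : List String :=
  let tekens := tekst.toList.foldl (fun acc _ => acc ++ "=") ""
  [tekst, tekens]

-- ===== PORT B =====
-- B: "=" * len(tekst), ported as a replicate of length tekst
def onderstreep_alt (tekst : String) : List String :=
  [tekst, String.ofList (List.replicate tekst.toList.length '=')]

-- ===== PRECONDITION & SPEC =====
def Spec_onderstreep (tekst : String) (out : List String) : Prop := out = onderstreep_alt tekst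
instance (tekst : String) (out : List String) : Decidable (Spec_onderstreep tekst out) := by unfold Spec_onderstreep; infer_instance

-- ===== CLAIM (what is proved, stated in full; the proofs are below) =====
def Claim_equal_onderstreep : Prop := ∀ (tekst : String), Dom_onderstreep tekst → Spec_onderstreep tekst (onderstreep tekst)

-- ===== LEMMAS AND PROOFS =====
theorem onderstreep_fold_repl (l : List Char) (s : List Char) :
    l.foldl (fun acc _ => acc ++ "=") (String.ofList s)
      = String.ofList (s ++ List.replicate l.length '=') := by
  induction l generalizing s with
  | nil => simp
  | cons c t ih =>
      simp only [List.foldl_cons, List.length_cons]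
      have h : String.ofList s ++ "=" = String.ofList (s ++ ['=']) := by
        rw [String.ofList_append]
      rw [h, ih]
      simp [List.replicate_succ, List.append_assoc]

-- ===== VERDICT (by name: the statement is the Claim_ definition above) =====
theorem onderstreep_spec : Claim_equal_onderstreep := by
  intro tekst _
  show _ = _
  unfold onderstreep onderstreep_alt
  have h : ("" : String) = String.ofList [] := rfl
  simp only [h, onderstreep_fold_repl, List.nil_append]
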